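-- pv_equiv track=rewrite | github.com/Debesyla/dago-domenai | src/checks/whois_check.py | _parse_das_response
-- ===== SOURCE A (Python) =====
-- from typing import Dict, Optional
--
-- def _parse_das_response(response: str, query_domain: str) -> Dict[str, str]:
--     """
--     Parse DAS response to extract domain and status.
--
--     Expected format:
--         % .lt registry DAS service
--         Domain: domain.lt
--         Status: available
--
--     Args:
--         response: Raw DAS response
--         query_domain: Original domain queried (fallback if parsing fails)
--
--     Returns:
--         {
--             'domain': str,  # Domain name from response
--             'status': str   # Status value (lowercase)
--         }
--     """
--     domain = query_domain
--     status = 'error'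
--
--     for line in response.split('\n'):
--         line = line.strip()
--
--         # Extract domain name
--         if line.startswith('Domain:'):
--             domain = line.split(':', 1)[1].strip()
--
--         # Extract status
--         elif line.startswith('Status:'):
--             status = line.split(':', 1)[1].strip().lower()
--
--     return {
--         'domain': domain,
--         'status': status
--     }
-- ===== SOURCE B (Python) =====
-- def _parse_das_response(response: str, query_domain: str):
--     """Table-driven rewrite: one uniform pass builds a key->value map
--     (pre-colon segment kept raw, value stripped, last write wins),
--     then the result is two lookups."""
--     fields = {}
--     for line in response.split('\n'):
--         key, sep, value = line.strip().partition(':')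
--         if sep:
--             fields[key] = value.strip()
--     return {
--         'domain': fields.get('Domain', query_domain),
--         'status': fields.get('Status', 'error').lower()
--     }
-- ===== Notes on version B (the rewrite author's own statement) =====
-- stated objective: alternative
-- what changed: A's loop branches per line on startswith('Domain:')/('Status:') and threads a (domain, status) accumulator; B makes one uniform pass that partitions every line at its first colon into a key->value table (last write wins) and then answers with two dictionary lookups.
import Mathlib
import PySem

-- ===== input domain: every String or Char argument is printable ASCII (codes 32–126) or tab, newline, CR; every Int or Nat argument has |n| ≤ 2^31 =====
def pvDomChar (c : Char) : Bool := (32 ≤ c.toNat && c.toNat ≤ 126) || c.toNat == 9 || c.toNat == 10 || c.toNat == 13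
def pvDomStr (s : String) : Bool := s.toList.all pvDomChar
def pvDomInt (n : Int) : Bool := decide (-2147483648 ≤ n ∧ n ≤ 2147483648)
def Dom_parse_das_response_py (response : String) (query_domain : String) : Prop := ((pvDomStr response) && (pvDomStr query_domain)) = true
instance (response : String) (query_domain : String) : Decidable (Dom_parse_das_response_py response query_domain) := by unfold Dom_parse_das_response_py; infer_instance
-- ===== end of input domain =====

-- B replaces A's per-line two-branch accumulator with one uniform pass building a
-- key→value table (raw pre-colon segment → stripped value, last write wins) followed by two lookups (objective: alternative decomposition).


-- ===== PORT A =====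
-- A's loop body: strip the line; on startswith 'Domain:'/'Status:' take split(':',1)[1].strip()
-- (lowercased for status).  `split(':',1)[1]` is ported as pyGet? … 1 |>.getD "": inside these
-- branches the line contains ':', so the index exists and Python never raises here.
def pvStepA (st : String × String) (line0 : String) : String × String :=
  let line := PySem.Str.strip line0
  if PySem.Str.startswith line "Domain:" then
    (PySem.Str.strip ((PySem.List.pyGet? ((PySem.Str.splitMax? line ":" 1).getD []) 1).getD ""), st.2)
  else if PySem.Str.startswith line "Status:" then
    (st.1, PySem.Str.lower (PySem.Str.strip ((PySem.List.pyGet? ((PySem.Str.splitMax? line ":" 1).getD []) 1).getD "")))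
  else st

-- response.split('\n'): the separator is nonempty, so Str.split? is always `some`; .getD [] is exact.
def parse_das_response_py (response : String) (query_domain : String) : List (String × String) :=
  let st := ((PySem.Str.split? response "\n").getD []).foldl pvStepA (query_domain, "error")
  [("domain", st.1), ("status", st.2)]

-- ===== PORT B =====
-- B's loop body: `key, sep, value = line.strip().partition(':')` ported exactly via the index of
-- the FIRST colon: sep is nonempty iff find ≠ -1, key = s[:i], value = s[i+1:].
def pvStepB (d : PySem.Dict String String) (line0 : String) : PySem.Dict String String :=
  let s := PySem.Str.strip line0
  let i := PySem.Str.find s ":"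
  if i = -1 then d
  else d.insert (PySem.Str.slice s none (some i)) (PySem.Str.strip (PySem.Str.slice s (some (i + 1)) none))

def parse_das_response_py_alt (response : String) (query_domain : String) : List (String × String) :=
  let fields := ((PySem.Str.split? response "\n").getD []).foldl pvStepB (PySem.Dict.mk [])
  [("domain", fields.getD "Domain" query_domain),
   ("status", PySem.Str.lower (fields.getD "Status" "error"))]

-- ===== PRECONDITION & SPEC =====
def Spec_parse_das_response_py (response : String) (query_domain : String) (out : List (String × String)) : Prop := out = parse_das_response_py_alt response query_domain
instance (response : String) (query_domain : String) (out : List (String × String)) : Decidable (Spec_parse_das_response_py response query_domain out) := by unfold Spec_parse_das_response_py; infer_instance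

-- ===== CLAIM (what is proved, stated in full; the proofs are below) =====
def Claim_equal_parse_das_response_py : Prop := ∀ (response : String) (query_domain : String), Dom_parse_das_response_py response query_domain → Spec_parse_das_response_py response query_domain (parse_das_response_py response query_domain)

-- ===== LEMMAS AND PROOFS =====

-- B's dict, read the way the result reads it: fallback domain and lowercased status.
def pvView (d : PySem.Dict String String) (qd : String) : String × String :=
  (d.getD "Domain" qd, PySem.Str.lower (d.getD "Status" "error"))

-- splitOnMax.go with budget 0 emits the remainder as the last piece.
theorem pvGoZero (sep : List Char) (f : Nat) (l : List Char) (acc : List (List Char)) :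
    PySem.Chars.splitOnMax.go sep f 0 l [] acc = (l :: acc).reverse := by
  cases f with
  | zero => simp [PySem.Chars.splitOnMax.go]
  | succ f => cases l <;> simp [PySem.Chars.splitOnMax.go]

-- splitOnMax.go with budget 1 on a list whose first colon is after `pre`.
theorem pvGoFound (pre rest cur : List Char) (acc : List (List Char)) (f : Nat)
    (hpre : ':' ∉ pre) (hf : pre.length < f) :
    PySem.Chars.splitOnMax.go [':'] f 1 (pre ++ ':' :: rest) cur acc
      = acc.reverse ++ [cur.reverse ++ pre, rest] := by
  induction pre generalizing f cur acc with
  | nil =>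
      cases f with
      | zero => omega
      | succ f =>
          simp only [List.nil_append, PySem.Chars.splitOnMax.go]
          simp [List.isPrefixOf, pvGoZero]
  | cons c pre ih =>
      cases f with
      | zero => simp at hf
      | succ f =>
          have hc : c ≠ ':' := fun h => hpre (by simp [h])
          simp only [List.cons_append, PySem.Chars.splitOnMax.go]
          rw [if_neg (by simp), if_neg (by simp [List.isPrefixOf, Ne.symm hc])]
          rw [ih (c :: cur) acc f (fun h => hpre (List.mem_cons_of_mem _ h)) (by simpa using Nat.lt_of_succ_lt_succ hf)]
          simp

-- s.split(':', 1) where the first colon follows `pre`.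
theorem pvSplit1 (pre rest : List Char) (hpre : ':' ∉ pre) :
    PySem.Chars.splitOnMax (pre ++ ':' :: rest) [':'] 1 = [pre, rest] := by
  unfold PySem.Chars.splitOnMax
  rw [if_neg (by norm_num)]
  simp only [Int.toNat_one]
  rw [pvGoFound pre rest [] [] _ hpre (by simp)]
  rfl

-- a list with no colon, followed by ':', determines its parts uniquely
theorem pvColonCancel (p q r s : List Char) (hp : ':' ∉ p) (hq : ':' ∉ q)
    (h : p ++ ':' :: r = q ++ ':' :: s) : p = q ∧ r = s := by
  induction p generalizing q with
  | nil =>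
      cases q with
      | nil => simpa using h
      | cons c q =>
          simp only [List.nil_append, List.cons_append, List.cons.injEq] at h
          exact absurd (by simp [← h.1]) hq
  | cons c p ih =>
      cases q with
      | nil =>
          simp only [List.cons_append, List.nil_append, List.cons.injEq] at h
          exact absurd (by simp [h.1]) hp
      | cons c' q =>
          simp only [List.cons_append, List.cons.injEq] at h
          have := ih q (fun hm => hp (List.mem_cons_of_mem _ hm)) (fun hm => hq (List.mem_cons_of_mem _ hm)) h.2
          exact ⟨by rw [h.1, this.1], this.2⟩

-- startswith (pre ++ ':' :: rest) (P ++ [':']) decides pre = P, when neither part has a colon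
theorem pvStartIff (pre rest P : List Char) (hpre : ':' ∉ pre) (hP : ':' ∉ P) :
    (P ++ [':']) <+: (pre ++ ':' :: rest) ↔ pre = P := by
  constructor
  · rintro ⟨u, hu⟩
    rw [List.append_assoc] at hu
    simpa using (pvColonCancel pre P rest u hpre hP (by simpa using hu.symm)).1
  · rintro rfl
    exact ⟨rest, by simp⟩

-- decomposition of a list at its first colon
theorem pvFindDecomp (l : List Char) (h : 0 ≤ PySem.Chars.find l [':']) :
    l = l.take (PySem.Chars.find l [':']).toNat ++ ':' :: l.drop ((PySem.Chars.find l [':']).toNat + 1)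
      ∧ ':' ∉ l.take (PySem.Chars.find l [':']).toNat := by
  obtain ⟨hpref, hmin⟩ := PySem.Chars.find_spec h
  set k := (PySem.Chars.find l [':']).toNat with hk
  obtain ⟨t, ht⟩ := hpref
  have hdrop : l.drop k = ':' :: t := by simpa using ht.symm
  have htail : l.drop (k + 1) = t := by
    rw [← List.tail_drop, hdrop]
    rfl
  constructor
  · rw [htail]
    conv_lhs => rw [← List.take_append_drop k l]
    rw [hdrop]
  · intro hmem
    obtain ⟨j, hj, hjv⟩ := List.getElem_of_mem hmem
    have hjk : j < k := by simp at hj; omega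
    have hjl : j < l.length := by simp at hj; omega
    refine hmin j hjk ⟨l.drop (j + 1), ?_⟩
    have hjv' : l[j] = ':' := by rw [← List.getElem_take (xs := l) (h := hj)]; exact hjv
    rw [List.drop_eq_getElem_cons hjl, hjv']
    rfl

-- the per-line commuting step: A's update of the (domain, status) pair is B's dict update, viewed
set_option maxHeartbeats 1000000 in
theorem pvStep (d : PySem.Dict String String) (qd line0 : String) :
    pvStepA (pvView d qd) line0 = pvView (pvStepB d line0) qd := by
  unfold pvStepA pvStepB
  set s := PySem.Str.strip line0 with hs
  have hDo : ("Domain:" : String).toList = ['D','o','m','a','i','n',':'] := by decide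
  have hSt : ("Status:" : String).toList = ['S','t','a','t','u','s',':'] := by decide
  have hCol : (":" : String).toList = [':'] := by decide
  simp only [PySem.Str.startswith_eq, PySem.Str.find_eq, hDo, hSt, hCol]
  by_cases hi : PySem.Chars.find s.toList [':'] = -1
  · -- no colon in the stripped line: B skips it and A's two startswith tests are both false
    have hnc : ':' ∉ s.toList := fun hm =>
      ((PySem.Chars.find_eq_neg_one_iff _ _).mp hi) ((List.singleton_infix_iff _ _).mpr hm)
    have hD : PySem.Chars.startswith s.toList ['D','o','m','a','i','n',':'] = false := by
      by_contra hb
      exact hnc (((PySem.Chars.startswith_iff _ _).mp (Bool.of_not_eq_false hb)).subset (by decide))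
    have hS : PySem.Chars.startswith s.toList ['S','t','a','t','u','s',':'] = false := by
      by_contra hb
      exact hnc (((PySem.Chars.startswith_iff _ _).mp (Bool.of_not_eq_false hb)).subset (by decide))
    rw [if_pos hi, hD, hS]
    simp
  · -- the line has a colon: decompose the line at its FIRST colon
    have h0' : 0 ≤ PySem.Chars.find s.toList [':'] := by
      have := PySem.Chars.neg_one_le_find s.toList [':']
      omega
    obtain ⟨hdec, hnc⟩ := pvFindDecomp s.toList h0'
    set k := (PySem.Chars.find s.toList [':']).toNat with hk
    set pre := s.toList.take k with hpredef
    set rest := s.toList.drop (k + 1) with hrestdef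
    have hkey : PySem.Str.slice s none (some (PySem.Chars.find s.toList [':'])) = String.ofList pre := by
      apply String.toList_inj.mp
      rw [PySem.Str.toList_slice, String.toList_ofList, PySem.Chars.slice_eq_listSlice,
        PySem.List.slice_to _ h0']
    have hval : PySem.Str.slice s (some (PySem.Chars.find s.toList [':'] + 1)) none = String.ofList rest := by
      apply String.toList_inj.mp
      rw [PySem.Str.toList_slice, String.toList_ofList, PySem.Chars.slice_eq_listSlice,
        PySem.List.slice_from _ (by omega)]
      have h1 : (PySem.Chars.find s.toList [':'] + 1).toNat = k + 1 := by omega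
      rw [h1]
    have hsplit : PySem.Str.splitMax? s ":" 1 = some [String.ofList pre, String.ofList rest] := by
      show Option.map _ (PySem.Chars.splitMax? s.toList ":".toList 1) = _
      show Option.map _ (if (":".toList).isEmpty = true then none
        else some (PySem.Chars.splitOnMax s.toList ":".toList 1)) = _
      rw [if_neg (by decide), hCol]
      have hso : PySem.Chars.splitOnMax s.toList [':'] 1 = [pre, rest] := by
        conv_lhs => rw [hdec]
        exact pvSplit1 pre rest hnc
      rw [hso]
      rfl
    have hD : PySem.Chars.startswith s.toList ['D','o','m','a','i','n',':'] = true ↔ pre = "Domain".toList := by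
      rw [PySem.Chars.startswith_iff]
      conv_lhs => rw [hdec]
      exact pvStartIff pre rest "Domain".toList hnc (by decide)
    have hS : PySem.Chars.startswith s.toList ['S','t','a','t','u','s',':'] = true ↔ pre = "Status".toList := by
      rw [PySem.Chars.startswith_iff]
      conv_lhs => rw [hdec]
      exact pvStartIff pre rest "Status".toList hnc (by decide)
    by_cases hp : pre = "Domain".toList
    · have hpre : String.ofList pre = "Domain" := by rw [hp]; exact String.ofList_toList
      rw [if_pos (hD.mpr hp), if_neg hi, hsplit, hkey, hval, hpre]
      simp only [pvView, Option.getD_some]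
      rw [show PySem.List.pyGet? [("Domain" : String), String.ofList rest] 1 = some (String.ofList rest) by rfl]
      simp [PySem.Dict.getD_insert]
    · by_cases hq : pre = "Status".toList
      · have hpre : String.ofList pre = "Status" := by rw [hq]; exact String.ofList_toList
        rw [if_neg (by rw [hD]; exact hp), if_pos (hS.mpr hq), if_neg hi, hsplit, hkey, hval, hpre]
        simp only [pvView, Option.getD_some]
        rw [show PySem.List.pyGet? [("Status" : String), String.ofList rest] 1 = some (String.ofList rest) by rfl]
        simp [PySem.Dict.getD_insert]
      · have hne : String.ofList pre ≠ "Domain" := fun h => hp (by rw [← h, String.toList_ofList])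
        have hne' : String.ofList pre ≠ "Status" := fun h => hq (by rw [← h, String.toList_ofList])
        have hne2 : ("Domain" : String) ≠ String.ofList pre := Ne.symm hne
        have hne2' : ("Status" : String) ≠ String.ofList pre := Ne.symm hne'
        rw [if_neg (by rw [hD]; exact hp), if_neg (by rw [hS]; exact hq), if_neg hi, hkey, hval]
        simp [pvView, PySem.Dict.getD_insert, hne2, hne2']

-- fold invariant
theorem pvFold (L : List String) (d : PySem.Dict String String) (qd : String) :
    L.foldl pvStepA (pvView d qd) = pvView (L.foldl pvStepB d) qd := by
  induction L generalizing d with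
  | nil => rfl
  | cons x L ih => simp only [List.foldl_cons, pvStep d qd x, ih]

-- ===== VERDICT (by name: the statement is the Claim_ definition above) =====
theorem parse_das_response_py_spec : Claim_equal_parse_das_response_py := by
  intro response query_domain _
  unfold Spec_parse_das_response_py parse_das_response_py parse_das_response_py_alt
  have hbase : pvView (PySem.Dict.mk []) query_domain = (query_domain, "error") := by
    show (_, PySem.Str.lower "error") = _
    rw [show PySem.Str.lower "error" = "error" by decide]
    rfl
  have h := pvFold ((PySem.Str.split? response "\n").getD []) (PySem.Dict.mk []) query_domain
  rw [hbase] at h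
  simp only [h, pvView]
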